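-- pv_equiv track=rewrite | github.com/mirror/chromium | third_party/WebKit/Source/build/scripts/make_css_value_id_mappings.py | _find_continuous_segment
-- ===== SOURCE A (Python) =====
-- def _find_continuous_segment(number_list):
--     """The function finds the longest continuous segment in an array of
--     number
--
--     Args:
--         number_list: Array of pair of number of size (n x 2)
--
--     Returns:
--         segment: a list contains the indices of the segment start point
--             and end point.
--         number_list: sorted by the first element version of the input.
--
--     """
--     segments = [0]
--     number_list_sorted = sorted(number_list, key=lambda elem: elem[0])
--     for i in range(len(number_list_sorted) - 1):
--         if not (number_list_sorted[i + 1][0] - number_list_sorted[i][0] == 1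
--                 and number_list_sorted[i + 1][1] - number_list_sorted[i][1] == 1):
--             segments.append(i + 1)
--     segments.append(len(number_list_sorted))
--     return segments, number_list_sorted
-- ===== SOURCE B (Python) =====
-- def _find_continuous_segment(number_list):
--     number_list_sorted = sorted(number_list, key=lambda elem: elem[0])
--     n = len(number_list_sorted)
--     segments = [0]
--     start = 0
--     while start < n:
--         a0, b0 = number_list_sorted[start]
--         j = 1
--         while start + j < n and number_list_sorted[start + j] == (a0 + j, b0 + j):
--             j += 1
--         if start > 0:
--             segments.append(start)
--         start += j
--     segments.append(n)
--     return segments, number_list_sorted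
-- ===== Notes on version B (the rewrite author's own statement) =====
-- stated objective: alternative
-- what changed: A scans all adjacent pairs of the sorted list testing (1,1) deltas; B jumps run-by-run, extracting each maximal continuous run by comparing elements to the run's first element plus an offset and recording the start index of every run after the first.
import Mathlib
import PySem

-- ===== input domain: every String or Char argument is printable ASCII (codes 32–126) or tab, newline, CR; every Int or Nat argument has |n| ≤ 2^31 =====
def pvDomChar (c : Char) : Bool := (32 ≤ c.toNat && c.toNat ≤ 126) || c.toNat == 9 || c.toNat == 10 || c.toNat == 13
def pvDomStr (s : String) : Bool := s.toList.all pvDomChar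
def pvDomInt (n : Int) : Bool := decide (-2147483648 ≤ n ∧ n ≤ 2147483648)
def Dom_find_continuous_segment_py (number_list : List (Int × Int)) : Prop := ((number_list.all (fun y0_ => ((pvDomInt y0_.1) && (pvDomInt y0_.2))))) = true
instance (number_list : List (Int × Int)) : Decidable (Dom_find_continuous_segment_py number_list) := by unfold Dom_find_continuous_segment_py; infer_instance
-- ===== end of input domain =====

-- B replaces A's adjacent-delta scan by a run-extraction loop: it jumps from run start
-- to run start, comparing each element to the run's FIRST element plus an offset, and
-- records the start index of every run after the first (objective: alternative, same cost).

-- ===== PORT A =====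
-- literal port of A: sort by first component, then for i in range(len-1) append i+1
-- whenever the adjacent pair does not increase by (1,1); finally append the length.
def find_continuous_segment_py (number_list : List (Int × Int)) : List Int × (List (Int × Int)) :=
  let number_list_sorted := PySem.List.sorted number_list (fun elem => elem.1)
  let segments : List Int :=
    (List.range (number_list_sorted.length - 1)).foldl
      (fun segs i =>
        if ¬ ((number_list_sorted.getD (i+1) (0,0)).1 - (number_list_sorted.getD i (0,0)).1 = 1 ∧
              (number_list_sorted.getD (i+1) (0,0)).2 - (number_list_sorted.getD i (0,0)).2 = 1)
        then segs ++ [((i : Int) + 1)] else segs) [(0 : Int)]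
  (segments ++ [(number_list_sorted.length : Int)], number_list_sorted)

-- ===== PORT B =====
-- inner while loop of Source B: advance j while nl[start+j] equals the run head shifted by j
def fcsInner (nl : List (Int × Int)) (a0 b0 : Int) (start j : Nat) : Nat :=
  if h : start + j < nl.length ∧ nl.getD (start + j) (0,0) = (a0 + (j : Int), b0 + (j : Int)) then
    fcsInner nl a0 b0 start (j + 1)
  else j
termination_by nl.length - (start + j)
decreasing_by omega

theorem fcsInner_ge (nl : List (Int × Int)) (a0 b0 : Int) (start j : Nat) :
    j ≤ fcsInner nl a0 b0 start j := by
  unfold fcsInner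
  split
  · exact le_trans (Nat.le_succ j) (fcsInner_ge nl a0 b0 start (j + 1))
  · exact le_refl j
termination_by nl.length - (start + j)
decreasing_by omega

-- outer while loop of Source B: record each run start except 0, jump to the next run
def fcsOuter (nl : List (Int × Int)) (start : Nat) (segments : List Int) : List Int :=
  if _h : start < nl.length then
    fcsOuter nl (start + fcsInner nl (nl.getD start (0,0)).1 (nl.getD start (0,0)).2 start 1)
      (if 0 < start then segments ++ [(start : Int)] else segments)
  else segments
termination_by nl.length - start
decreasing_by
  have := fcsInner_ge nl (nl.getD start (0,0)).1 (nl.getD start (0,0)).2 start 1; omega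

def find_continuous_segment_py_alt (number_list : List (Int × Int)) : List Int × (List (Int × Int)) :=
  let nl := PySem.List.sorted number_list (fun elem => elem.1)
  (fcsOuter nl 0 [(0 : Int)] ++ [(nl.length : Int)], nl)

-- ===== PRECONDITION & SPEC =====
def Spec_find_continuous_segment_py (number_list : List (Int × Int)) (out : List Int × (List (Int × Int))) : Prop := out = find_continuous_segment_py_alt number_list
instance (number_list : List (Int × Int)) (out : List Int × (List (Int × Int))) : Decidable (Spec_find_continuous_segment_py number_list out) := by unfold Spec_find_continuous_segment_py; infer_instance

-- ===== CLAIM (what is proved, stated in full; the proofs are below) =====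
def Claim_equal_find_continuous_segment_py : Prop := ∀ (number_list : List (Int × Int)), Dom_find_continuous_segment_py number_list → Spec_find_continuous_segment_py number_list (find_continuous_segment_py number_list)

-- ===== LEMMAS AND PROOFS =====

-- the adjacent-pair condition of A at index i
abbrev fcsCond (l : List (Int × Int)) (i : Nat) : Prop :=
  (l.getD (i+1) (0,0)).1 - (l.getD i (0,0)).1 = 1 ∧
  (l.getD (i+1) (0,0)).2 - (l.getD i (0,0)).2 = 1

-- the breakpoints in [start, l.length): indices k with 0 < k and ¬ fcsCond (k-1)
def fcsBreaks (l : List (Int × Int)) (start : Nat) : List Int :=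
  ((List.range' start (l.length - start)).filter
    (fun k => decide (0 < k ∧ ¬ fcsCond l (k-1)))).map (fun (k : Nat) => (k : Int))

theorem fcsInner_spec (l : List (Int × Int)) (a0 b0 : Int) (start j : Nat)
    (hj : 1 ≤ j) (hle : start + j ≤ l.length)
    (hprev : ∀ t, t < j → l.getD (start + t) (0,0) = (a0 + (t : Int), b0 + (t : Int))) :
    j ≤ fcsInner l a0 b0 start j ∧ start + fcsInner l a0 b0 start j ≤ l.length ∧
    (∀ t, t < fcsInner l a0 b0 start j →
       l.getD (start + t) (0,0) = (a0 + (t : Int), b0 + (t : Int))) ∧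
    (start + fcsInner l a0 b0 start j = l.length ∨
       l.getD (start + fcsInner l a0 b0 start j) (0,0)
         ≠ (a0 + (fcsInner l a0 b0 start j : Int), b0 + (fcsInner l a0 b0 start j : Int))) := by
  by_cases hc : start + j < l.length ∧ l.getD (start + j) (0,0) = (a0 + (j : Int), b0 + (j : Int))
  · have hr : fcsInner l a0 b0 start j = fcsInner l a0 b0 start (j + 1) := by
      rw [fcsInner]; rw [dif_pos hc]
    have hprev' : ∀ t, t < j + 1 → l.getD (start + t) (0,0) = (a0 + (t : Int), b0 + (t : Int)) := by
      intro t ht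
      rcases (by omega : t < j ∨ t = j) with h | h
      · exact hprev t h
      · subst h; exact hc.2
    obtain ⟨hA, hB, hC, hD⟩ := fcsInner_spec l a0 b0 start (j + 1) (by omega) (by omega) hprev'
    rw [hr]
    exact ⟨by omega, hB, hC, hD⟩
  · have hr : fcsInner l a0 b0 start j = j := by
      rw [fcsInner]; rw [dif_neg hc]
    rw [hr]
    refine ⟨le_refl _, hle, hprev, ?_⟩
    rcases Nat.lt_or_ge (start + j) l.length with hlt | hge
    · right; intro heq; exact hc ⟨hlt, heq⟩
    · left; omega
termination_by l.length - (start + j)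
decreasing_by omega

theorem fcsBreaks_nil (l : List (Int × Int)) (start : Nat) (h : l.length ≤ start) :
    fcsBreaks l start = [] := by
  unfold fcsBreaks
  have h0 : l.length - start = 0 := by omega
  simp [h0]

theorem fcsBreaks_split (l : List (Int × Int)) (start j : Nat)
    (hj : 1 ≤ j) (hB : start + j ≤ l.length)
    (hstart : 0 < start → ¬ fcsCond l (start - 1))
    (c1 : ∀ k, start < k → k < start + j → fcsCond l (k - 1)) :
    fcsBreaks l start = (if 0 < start then [(start : Int)] else []) ++ fcsBreaks l (start + j) := by
  unfold fcsBreaks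
  obtain ⟨jj, rfl⟩ : ∃ jj, j = jj + 1 := ⟨j - 1, by omega⟩
  have hlen : l.length - start = (jj + 1) + (l.length - (start + (jj + 1))) := by omega
  rw [hlen, ← List.range'_append]
  simp only [List.filter_append, List.map_append, Nat.one_mul]
  congr 1
  rw [List.range'_succ, List.filter_cons]
  have htail : (List.range' (start + 1) jj).filter (fun k => decide (0 < k ∧ ¬ fcsCond l (k - 1))) = [] := by
    rw [List.filter_eq_nil_iff]
    intro k hk
    have hmem : start + 1 ≤ k ∧ k < start + 1 + jj := List.mem_range'_1.mp hk
    have hcnd := c1 k (by omega) (by omega)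
    simp only [decide_eq_true_eq, not_and]
    exact fun _ h1 => h1 hcnd.1 hcnd.2
  by_cases hpos : 0 < start
  · have hnc := hstart hpos
    simp [hpos, hnc]
    intro x hx1 hx2 _
    exact c1 x hx1 (by omega)
  · simp [hpos]
    intro x hx1 hx2 _
    exact c1 x hx1 (by omega)

theorem fcsOuter_spec (l : List (Int × Int)) (start : Nat) (segs : List Int)
    (h1 : start ≤ l.length)
    (h2 : 0 < start → start < l.length → ¬ fcsCond l (start - 1)) :
    fcsOuter l start segs = segs ++ fcsBreaks l start := by
  by_cases hs : start < l.length
  · have hr : fcsOuter l start segs =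
        fcsOuter l (start + fcsInner l (l.getD start (0,0)).1 (l.getD start (0,0)).2 start 1)
          (if 0 < start then segs ++ [(start : Int)] else segs) := by
      rw [fcsOuter]; rw [dif_pos hs]
    obtain ⟨hA, hB, hC, hD⟩ := fcsInner_spec l (l.getD start (0,0)).1 (l.getD start (0,0)).2 start 1
      (le_refl 1) (by omega)
      (by intro t ht; rw [Nat.lt_one_iff.mp ht]; simp)
    set j := fcsInner l (l.getD start (0,0)).1 (l.getD start (0,0)).2 start 1 with hjdef
    have c1 : ∀ k, start < k → k < start + j → fcsCond l (k - 1) := by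
      intro k hk1 hk2
      obtain ⟨t, rfl⟩ : ∃ t, k = start + t + 1 := ⟨k - start - 1, by omega⟩
      have e1 := hC t (by omega)
      have e2 := hC (t + 1) (by omega)
      have hi1 : start + t + 1 - 1 = start + t := by omega
      have hi2 : start + t + 1 = start + (t + 1) := by omega
      unfold fcsCond
      rw [hi1, hi2, e1, e2]
      push_cast
      refine ⟨by ring, by ring⟩
    have c2 : start + j < l.length → ¬ fcsCond l (start + j - 1) := by
      intro hlt hcond
      rcases hD with h | h
      · omega
      · apply h
        have e1 := hC (j - 1) (by omega)
        unfold fcsCond at hcond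
        have hi1 : start + j - 1 + 1 = start + j := by omega
        have hi2 : start + (j - 1) = start + j - 1 := by omega
        rw [hi2] at e1
        rw [hi1, e1] at hcond
        rw [Prod.ext_iff]
        obtain ⟨hx, hy⟩ := hcond
        constructor
        · simp only []; omega
        · simp only []; omega
    have IH := fcsOuter_spec l (start + j) (if 0 < start then segs ++ [(start : Int)] else segs)
      hB (fun _ hlt => c2 hlt)
    rw [hr, IH, fcsBreaks_split l start j hA hB (fun hp => h2 hp hs) c1]
    by_cases hpos : 0 < start <;> simp [hpos]
  · have hr : fcsOuter l start segs = segs := by rw [fcsOuter]; rw [dif_neg hs]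
    rw [hr, fcsBreaks_nil l start (by omega)]
    simp
termination_by l.length - start
decreasing_by omega

theorem segments_eq (l : List (Int × Int)) :
    (List.range (l.length - 1)).foldl
      (fun segs i =>
        if ¬ ((l.getD (i+1) (0,0)).1 - (l.getD i (0,0)).1 = 1 ∧
              (l.getD (i+1) (0,0)).2 - (l.getD i (0,0)).2 = 1)
        then segs ++ [((i : Int) + 1)] else segs) [(0 : Int)]
    = fcsOuter l 0 [(0 : Int)] := by
  rw [fcsOuter_spec l 0 [(0 : Int)] (Nat.zero_le _) (by omega)]
  rw [PySem.List.foldl_append_ite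
      (fun i => ¬ ((l.getD (i+1) (0,0)).1 - (l.getD i (0,0)).1 = 1 ∧
                   (l.getD (i+1) (0,0)).2 - (l.getD i (0,0)).2 = 1))
      (fun i => ((i : Int) + 1))]
  congr 1
  unfold fcsBreaks
  rw [Nat.sub_zero]
  rcases Nat.eq_zero_or_pos l.length with h0 | h0
  · simp [h0]
  · obtain ⟨m, hm⟩ : ∃ m, l.length = m + 1 := ⟨l.length - 1, by omega⟩
    rw [hm, List.range'_succ, List.filter_cons]
    simp only [Nat.add_sub_cancel, Nat.lt_irrefl, false_and, decide_false,
      Bool.false_eq_true, if_false]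
    rw [List.range'_eq_map_range, List.filter_map, List.map_map]
    have hp : ((fun k => decide (0 < k ∧ ¬ fcsCond l (k - 1))) ∘ fun x => 0 + 1 + x)
        = fun i => decide (¬ ((l.getD (i+1) (0,0)).1 - (l.getD i (0,0)).1 = 1 ∧
                   (l.getD (i+1) (0,0)).2 - (l.getD i (0,0)).2 = 1)) := by
      funext i
      have h2 : 0 + 1 + i = i + 1 := by omega
      simp [Function.comp, h2, fcsCond]
    have hf : ((fun (k : Nat) => (k : Int)) ∘ fun x => 0 + 1 + x) = fun (i : Nat) => (i : Int) + 1 := by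
      funext i
      simp [Function.comp]
      ring
    rw [hp, hf]

-- ===== VERDICT (by name: the statement is the Claim_ definition above) =====
theorem find_continuous_segment_py_spec : Claim_equal_find_continuous_segment_py := by
  intro number_list _
  unfold Spec_find_continuous_segment_py find_continuous_segment_py find_continuous_segment_py_alt
  simp only []
  rw [segments_eq]
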